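-- pv_equiv track=rewrite | github.com/LenorEric/ToyLockCrack | lock_with_swap.py | lock_with_swap
-- ===== SOURCE A (Python) =====
-- def encrypt(a, b, c, const):
--     a = int(a)
--     b = int(b)
--     c = int(c)
--     return str((a + b + c + const) % 10)
--
-- def lock_with_swap(target, check):
--     ret = ""
--     pro_len = check % 3 + 1
--     remain = len(target)
--     curr = 0
--     while remain:
--         if pro_len == 1:
--             ret += encrypt(curr, target[curr], check, 0)
--         elif pro_len == 2:
--             ret += encrypt(target[curr + 1], curr, - check, 2)
--             ret += encrypt(target[curr], curr, check, 4)
--         else: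
--             ret += encrypt(target[curr + 2], curr, - check, 3)
--             ret += encrypt(target[curr], curr, check, 6)
--             ret += encrypt(target[curr + 1], curr, - check, 9)
--         curr += pro_len
--         remain -= pro_len
--         pro_len -= 1
--         if pro_len == 0:
--             pro_len = 3
--         if pro_len > remain:
--             pro_len = remain
--     return ret
-- ===== SOURCE B (Python) =====
-- def lock_with_swap(target, check):
--     # Closed form: the block sizes are eventually periodic (3,2,1 over 6 chars),
--     # so each output character is computed independently from its index alone.
--     n = len(target)
--     c = check % 3 + 1
--     shift = 6 - c * (c + 1) // 2   # aligns position 0 with its phase in the 3,2,1 cycle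
--
--     def emit(i):
--         q = (i + shift) % 6
--         if q < 3:
--             r, ideal = q, 3
--         elif q < 5:
--             r, ideal = q - 3, 2
--         else:
--             r, ideal = 0, 1
--         curr = i - r                      # start of the block containing i
--         s = min(ideal, n - curr)          # the final block is truncated
--         d = lambda j: int(target[j])
--         if s == 1:
--             return str((curr + d(curr) + check) % 10)
--         if s == 2:
--             if r == 0:
--                 return str((d(curr + 1) + curr - check + 2) % 10)
--             return str((d(curr) + curr + check + 4) % 10)
--         if r == 0:
--             return str((d(curr + 2) + curr - check + 3) % 10)
--         if r == 1:
--             return str((d(curr) + curr + check + 6) % 10)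
--         return str((d(curr + 1) + curr - check + 9) % 10)
--
--     return "".join(emit(i) for i in range(n))
-- ===== Notes on version B (the rewrite author's own statement) =====
-- stated objective: alternative
-- what changed: B drops A's sequential block-state loop (pro_len/remain/curr recurrence) entirely: the block sizes are eventually periodic (3,2,1 over every 6 characters), so B computes each output character independently from its own index by modular arithmetic, locating its block start, size and role in closed form.
import Mathlib
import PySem

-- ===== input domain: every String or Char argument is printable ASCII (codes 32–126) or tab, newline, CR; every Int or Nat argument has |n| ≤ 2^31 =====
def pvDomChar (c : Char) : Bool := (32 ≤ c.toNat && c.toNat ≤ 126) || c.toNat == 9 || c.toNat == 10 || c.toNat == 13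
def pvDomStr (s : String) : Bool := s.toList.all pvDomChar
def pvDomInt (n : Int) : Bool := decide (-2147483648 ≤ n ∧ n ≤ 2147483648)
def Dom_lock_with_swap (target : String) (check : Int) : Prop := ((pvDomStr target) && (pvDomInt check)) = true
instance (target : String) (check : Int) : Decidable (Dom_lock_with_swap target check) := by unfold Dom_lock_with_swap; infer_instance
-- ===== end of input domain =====

-- B replaces A's sequential block-state loop by a closed form: the block sizes are
-- eventually periodic (3,2,1 over 6 characters), so each output character is computed
-- independently from its own index; objective: alternative algorithm, same O(n) cost.
-- Pre_ excludes inputs where Python A raises: a non-digit character (ValueError in int())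
-- or a non-empty target shorter than the initial block size check%3+1 (IndexError).

-- ===== PORT A =====
-- encrypt(a,b,c,const): arguments already ints here (int() on a digit char is pvDigitA below)
def pvEncryptA (a b c const : Int) : String := PySem.Int.toStr (PySem.Int.mod (a + b + c + const) 10)

-- int(target[i]) for a digit char; 0 outside range / non-digit (those inputs are outside Pre_)
def pvDigitA (t : List Char) (i : Nat) : Int :=
  match t[i]? with
  | some c => (c.toNat : Int) - 48
  | none => 0

-- the while loop of A, state (ret, pro_len, remain, curr); the proLen = 0 test is a
-- totality guard only (unreachable: pro_len stays ≥ 1 in Python)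
def pvLoopA (t : List Char) (check : Int) (proLen remain curr : Nat) (ret : String) : String :=
  if _h0 : remain = 0 then ret
  else if _h1 : proLen = 0 then ret
  else
    let ret' :=
      if proLen = 1 then
        ret ++ pvEncryptA curr (pvDigitA t curr) check 0
      else if proLen = 2 then
        ret ++ pvEncryptA (pvDigitA t (curr + 1)) curr (-check) 2
            ++ pvEncryptA (pvDigitA t curr) curr check 4
      else
        ret ++ pvEncryptA (pvDigitA t (curr + 2)) curr (-check) 3
            ++ pvEncryptA (pvDigitA t curr) curr check 6
            ++ pvEncryptA (pvDigitA t (curr + 1)) curr (-check) 9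
    let curr' := curr + proLen
    let remain' := remain - proLen
    let p1 := proLen - 1
    let p2 := if p1 = 0 then 3 else p1
    let p3 := if p2 > remain' then remain' else p2
    pvLoopA t check p3 remain' curr' ret'
termination_by remain
decreasing_by omega

def lock_with_swap (target : String) (check : Int) : String :=
  pvLoopA target.toList check (PySem.Int.mod check 3 + 1).toNat target.toList.length 0 ""

-- ===== PORT B =====
-- int(target[j]); 0 outside range / non-digit (outside Pre_)
def pvDigitB (t : List Char) (j : Nat) : Int :=
  (t[j]?.map (fun c => (c.toNat : Int) - 48)).getD 0

-- emit(i): locate the block containing position i by modular arithmetic alone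
def pvEmitB (t : List Char) (check : Int) (n shift i : Nat) : String :=
  let q := (i + shift) % 6
  let r := if q < 3 then q else if q < 5 then q - 3 else 0
  let ideal := if q < 3 then 3 else if q < 5 then 2 else 1
  let curr := i - r
  let s := min ideal (n - curr)
  if s = 1 then
    PySem.Int.toStr (PySem.Int.mod ((curr : Int) + pvDigitB t curr + check) 10)
  else if s = 2 then
    if r = 0 then PySem.Int.toStr (PySem.Int.mod (pvDigitB t (curr + 1) + curr - check + 2) 10)
    else PySem.Int.toStr (PySem.Int.mod (pvDigitB t curr + curr + check + 4) 10)
  else if r = 0 then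
    PySem.Int.toStr (PySem.Int.mod (pvDigitB t (curr + 2) + curr - check + 3) 10)
  else if r = 1 then
    PySem.Int.toStr (PySem.Int.mod (pvDigitB t curr + curr + check + 6) 10)
  else
    PySem.Int.toStr (PySem.Int.mod (pvDigitB t (curr + 1) + curr - check + 9) 10)

def lock_with_swap_alt (target : String) (check : Int) : String :=
  let n := target.toList.length
  let c := (PySem.Int.mod check 3 + 1).toNat
  let shift := 6 - c * (c + 1) / 2
  PySem.Str.join "" ((List.range n).map (pvEmitB target.toList check n shift))

-- ===== PRECONDITION & SPEC =====
-- Pre_: exactly where Python A returns: every character a decimal digit, and the string is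
-- empty or at least as long as the initial block size check%3+1 (else IndexError on first block)
def Pre_lock_with_swap (target : String) (check : Int) : Prop :=
  (target.toList.all (fun c => 48 ≤ c.toNat && c.toNat ≤ 57)) = true ∧
  (target.toList.length = 0 ∨ PySem.Int.mod check 3 + 1 ≤ (target.toList.length : Int))
instance (target : String) (check : Int) : Decidable (Pre_lock_with_swap target check) := by
  unfold Pre_lock_with_swap; infer_instance

def pvWitness_lock_with_swap : String × Int := ("4096", 7)

def Spec_lock_with_swap (target : String) (check : Int) (out : String) : Prop := out = lock_with_swap_alt target check
instance (target : String) (check : Int) (out : String) : Decidable (Spec_lock_with_swap target check out) := by unfold Spec_lock_with_swap; infer_instance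

-- ===== CLAIM (what is proved, stated in full; the proofs are below) =====
def Claim_equal_lock_with_swap : Prop := ∀ (target : String) (check : Int), Dom_lock_with_swap target check → Pre_lock_with_swap target check → Spec_lock_with_swap target check (lock_with_swap target check)

-- ===== LEMMAS AND PROOFS =====

theorem pvDigitB_eq_digitA (t : List Char) (i : Nat) : pvDigitB t i = pvDigitA t i := by
  unfold pvDigitA pvDigitB; cases t[i]? <;> rfl
theorem pvJoin_nil_cons (x : List Char) (xs : List (List Char)) :
    PySem.Chars.join [] (x :: xs) = x ++ PySem.Chars.join [] xs := by
  cases xs with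
  | nil => simp [PySem.Chars.join, List.intercalate]
  | cons y ys => rw [PySem.Chars.join_cons_cons]; simp
theorem pvJoin_nil_append (xs ys : List (List Char)) :
    PySem.Chars.join [] (xs ++ ys) = PySem.Chars.join [] xs ++ PySem.Chars.join [] ys := by
  induction xs with
  | nil => simp [PySem.Chars.join_nil]
  | cons x xs ih => simp [pvJoin_nil_cons, ih]

theorem pvRangeSplit (curr remain k : Nat) (h : k ≤ remain) :
    List.range' curr remain = List.range' curr k ++ List.range' (curr + k) (remain - k) := by
  have h2 := @List.range'_append curr k (remain - k) 1
  simp only [Nat.one_mul] at h2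
  rw [show k + (remain - k) = remain from by omega] at h2
  exact h2.symm

theorem pvLoopA_eq_emit (t : List Char) (check : Int) (n shift : Nat) :
    ∀ remain curr proLen ret, curr + remain = n →
      (remain ≠ 0 → (((curr + shift) % 6 = 0 ∧ proLen = min 3 remain) ∨
         ((curr + shift) % 6 = 3 ∧ proLen = min 2 remain) ∨
         ((curr + shift) % 6 = 5 ∧ proLen = min 1 remain))) →
      (pvLoopA t check proLen remain curr ret).toList =
        ret.toList ++ PySem.Chars.join []
          (((List.range' curr remain).map (pvEmitB t check n shift)).map String.toList) := by
  intro remain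
  induction remain using Nat.strong_induction_on with
  | _ remain ih =>
  intro curr proLen ret hc hinv
  by_cases h0 : remain = 0
  · subst h0; rw [pvLoopA]; simp [PySem.Chars.join_nil]
  · have hnc : n - curr = remain := by omega
    rcases hinv h0 with ⟨hq, hp⟩ | ⟨hq, hp⟩ | ⟨hq, hp⟩
    · by_cases h3 : 3 ≤ remain
      · have hpl : proLen = 3 := by omega
        subst hpl
        rw [pvLoopA, dif_neg h0, dif_neg (by omega : (3:Nat) ≠ 0)]
        norm_num
        rw [show (if remain ≤ 4 then remain - 3 else 2) = min 2 (remain - 3) from by split_ifs <;> omega]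
        rw [ih (remain - 3) (by omega) (curr + 3) (min 2 (remain - 3)) _ (by omega)
          (fun _ => Or.inr (Or.inl ⟨by omega, rfl⟩))]
        rw [pvRangeSplit curr remain 3 (by omega)]
        have hr3 : List.range' curr 3 = [curr, curr + 1, curr + 2] := by simp [List.range']
        have m1 : (curr + 1 + shift) % 6 = 1 := by omega
        have m2 : (curr + 2 + shift) % 6 = 2 := by omega
        have hmin : min 3 (n - curr) = 3 := by omega
        simp only [hr3, List.map_append, pvJoin_nil_append, List.map_cons, List.map_nil,
          Function.comp, pvJoin_nil_cons, PySem.Chars.join_nil, pvEmitB, hq, m1, m2]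
        norm_num [hmin]
        simp [pvEncryptA, pvDigitB_eq_digitA]
        ring_nf
      · -- clamped final block in phase 0: remain = 1 or 2
        rcases (by omega : remain = 1 ∨ remain = 2) with hr | hr <;> subst hr
        · have hpl : proLen = 1 := by omega
          subst hpl
          rw [pvLoopA, dif_neg h0, dif_neg (by omega : (1:Nat) ≠ 0)]
          norm_num
          rw [ih 0 (by omega) (curr + 1) 0 _ (by omega) (fun h => absurd rfl h)]
          have hmin : min 3 (n - curr) = 1 := by omega
          simp only [List.range', List.map_nil, PySem.Chars.join_nil, pvEmitB, hq]
          norm_num [hmin]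
          simp [pvEncryptA, pvDigitB_eq_digitA]
        · have hpl : proLen = 2 := by omega
          subst hpl
          rw [pvLoopA, dif_neg h0, dif_neg (by omega : (2:Nat) ≠ 0)]
          norm_num
          rw [ih 0 (by omega) (curr + 2) 0 _ (by omega) (fun h => absurd rfl h)]
          have hr2 : List.range' curr 2 = [curr, curr + 1] := by simp [List.range']
          have m1 : (curr + 1 + shift) % 6 = 1 := by omega
          have hmin : min 3 (n - curr) = 2 := by omega
          simp only [hr2, List.map_cons, List.map_nil, Function.comp,
            pvJoin_nil_cons, PySem.Chars.join_nil, pvEmitB, hq, m1]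
          norm_num [hmin]
          simp [pvEncryptA, pvDigitB_eq_digitA]
          ring_nf
    · -- phase 3: ideal size 2
      by_cases h2 : 2 ≤ remain
      · have hpl : proLen = 2 := by omega
        subst hpl
        rw [pvLoopA, dif_neg h0, dif_neg (by omega : (2:Nat) ≠ 0)]
        norm_num
        rw [show (if remain - 2 = 0 then remain - 2 else 1) = min 1 (remain - 2) from by split_ifs <;> omega]
        rw [ih (remain - 2) (by omega) (curr + 2) (min 1 (remain - 2)) _ (by omega)
          (fun _ => Or.inr (Or.inr ⟨by omega, rfl⟩))]
        rw [pvRangeSplit curr remain 2 (by omega)]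
        have hr2 : List.range' curr 2 = [curr, curr + 1] := by simp [List.range']
        have m1 : (curr + 1 + shift) % 6 = 4 := by omega
        have hmin : min 2 (n - curr) = 2 := by omega
        simp only [hr2, List.map_append, pvJoin_nil_append, List.map_cons, List.map_nil,
          Function.comp, pvJoin_nil_cons, PySem.Chars.join_nil, pvEmitB, hq, m1]
        norm_num [hmin]
        simp [pvEncryptA, pvDigitB_eq_digitA]
        ring_nf
      · have hr : remain = 1 := by omega
        subst hr
        have hpl : proLen = 1 := by omega
        subst hpl
        rw [pvLoopA, dif_neg h0, dif_neg (by omega : (1:Nat) ≠ 0)]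
        norm_num
        rw [ih 0 (by omega) (curr + 1) 0 _ (by omega) (fun h => absurd rfl h)]
        have hmin : min 2 (n - curr) = 1 := by omega
        simp only [List.range', List.map_nil, PySem.Chars.join_nil, pvEmitB, hq]
        norm_num [hmin]
        simp [pvEncryptA, pvDigitB_eq_digitA]
    · -- phase 5: ideal size 1
      have hpl : proLen = 1 := by omega
      subst hpl
      rw [pvLoopA, dif_neg h0, dif_neg (by omega : (1:Nat) ≠ 0)]
      norm_num
      rw [show (if remain - 1 < 3 then remain - 1 else 3) = min 3 (remain - 1) from by split_ifs <;> omega]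
      rw [ih (remain - 1) (by omega) (curr + 1) (min 3 (remain - 1)) _ (by omega)
        (fun _ => Or.inl ⟨by omega, rfl⟩)]
      rw [pvRangeSplit curr remain 1 (by omega)]
      have hmin : min 1 (n - curr) = 1 := by omega
      simp only [List.range', List.map_append, pvJoin_nil_append, List.map_cons, List.map_nil,
        Function.comp, pvJoin_nil_cons, PySem.Chars.join_nil, pvEmitB, hq]
      norm_num [hmin]
      simp [pvEncryptA, pvDigitB_eq_digitA]

theorem lock_with_swap_spec : Claim_equal_lock_with_swap := by
  intro target check _ hpre
  unfold Spec_lock_with_swap lock_with_swap lock_with_swap_alt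
  rcases hpre with ⟨_, hlen⟩
  have hm0 : 0 ≤ PySem.Int.mod check 3 := PySem.Int.mod_nonneg check (by norm_num)
  have hm3 : PySem.Int.mod check 3 < 3 := PySem.Int.mod_lt check (by norm_num)
  have hL : target.length = target.toList.length := (String.length_toList).symm
  apply String.toList_inj.mp
  dsimp only
  rw [List.range_eq_range']
  rcases (by omega : PySem.Int.mod check 3 = 0 ∨ PySem.Int.mod check 3 = 1 ∨ PySem.Int.mod check 3 = 2) with hm | hm | hm
  · rw [hm] at hlen ⊢
    norm_num
    rw [hL, pvLoopA_eq_emit target.toList check target.toList.length 5 target.toList.length 0 1 ""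
      (by omega) (fun hn0 => Or.inr (Or.inr ⟨by norm_num, by omega⟩))]
    simp [List.map_map]
  · rw [hm] at hlen ⊢
    norm_num
    rw [show Int.toNat 2 = 2 from rfl]
    norm_num
    rw [hL, pvLoopA_eq_emit target.toList check target.toList.length 3 target.toList.length 0 2 ""
      (by omega) (fun hn0 => Or.inr (Or.inl ⟨by norm_num, by omega⟩))]
    simp [List.map_map]
  · rw [hm] at hlen ⊢
    norm_num
    rw [show Int.toNat 3 = 3 from rfl]
    norm_num
    rw [hL, pvLoopA_eq_emit target.toList check target.toList.length 0 target.toList.length 0 3 ""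
      (by omega) (fun hn0 => Or.inl ⟨by norm_num, by omega⟩)]
    simp [List.map_map]
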